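-- pv_equiv track=rewrite | github.com/Alig1493/v-mcp-2 | src/vmcp/utils/aggregate_results.py | get_worst_severity
-- ===== SOURCE A (Python) =====
-- from typing import Any
--
-- SEVERITY_ORDER = {
--     'CRITICAL': 0,
--     'HIGH': 1,
--     'MEDIUM': 2,
--     'LOW': 3,
--     'UNKNOWN': 4,
--     'WARNING': 5,
--     'NONE': 6,
-- }
--
-- def get_worst_severity(vulnerabilities: list[dict[str, Any]]) -> str:
--     """Get the worst (highest priority) severity from a list of findings."""
--     if not vulnerabilities:
--         return 'NONE'
--
--     worst_severity = 'NONE'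
--     worst_priority = SEVERITY_ORDER.get(worst_severity, 999)
--
--     for vuln in vulnerabilities:
--         severity = vuln.get('severity', 'UNKNOWN')
--         priority = SEVERITY_ORDER.get(severity, 999)
--
--         if priority < worst_priority:
--             worst_severity = severity
--             worst_priority = priority
--
--     return worst_severity
-- ===== SOURCE B (Python) =====
-- SEVERITY_ORDER = {
--     'CRITICAL': 0,
--     'HIGH': 1,
--     'MEDIUM': 2,
--     'LOW': 3,
--     'UNKNOWN': 4,
--     'WARNING': 5,
--     'NONE': 6,
-- }
--
-- def get_worst_severity(vulnerabilities):
--     """Get the worst (highest priority) severity from a list of findings."""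
--     present = {v.get('severity', 'UNKNOWN') for v in vulnerabilities}
--     for level in SEVERITY_ORDER:
--         if level in present:
--             return level
--     return 'NONE'
-- ===== Notes on version B (the rewrite author's own statement) =====
-- stated objective: idiomatic
-- what changed: Instead of scanning vulnerabilities while tracking a running (severity, priority) minimum, B builds the set of severities present in one comprehension and returns the first level of the fixed priority-ordered SEVERITY_ORDER keys that is present, defaulting to 'NONE'.
import Mathlib
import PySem

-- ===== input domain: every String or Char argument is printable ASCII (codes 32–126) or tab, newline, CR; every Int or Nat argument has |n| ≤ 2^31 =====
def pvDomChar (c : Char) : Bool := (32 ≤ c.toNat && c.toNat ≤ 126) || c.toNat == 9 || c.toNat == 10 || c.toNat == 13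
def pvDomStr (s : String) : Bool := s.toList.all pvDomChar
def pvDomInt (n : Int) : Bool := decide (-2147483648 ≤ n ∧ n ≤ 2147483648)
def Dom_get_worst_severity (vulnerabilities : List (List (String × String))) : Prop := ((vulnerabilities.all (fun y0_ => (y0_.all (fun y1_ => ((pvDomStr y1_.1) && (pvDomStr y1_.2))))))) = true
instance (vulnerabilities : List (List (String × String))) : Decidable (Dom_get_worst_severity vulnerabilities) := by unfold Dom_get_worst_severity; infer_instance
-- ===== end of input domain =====

-- B is an idiomatic re-implementation: it builds the set of severities present and returns the
-- first key of the priority-ordered SEVERITY_ORDER that is present, defaulting to "NONE".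

-- ===== PORT A =====
def SEVERITY_ORDER : PySem.Dict String Int :=
  PySem.Dict.mk [("CRITICAL", 0), ("HIGH", 1), ("MEDIUM", 2), ("LOW", 3), ("UNKNOWN", 4), ("WARNING", 5), ("NONE", 6)]

def get_worst_severity (vulnerabilities : List (List (String × String))) : String :=
  if vulnerabilities = [] then "NONE"
  else
    let worst_severity := "NONE"
    let worst_priority := PySem.Dict.getD SEVERITY_ORDER worst_severity 999
    (vulnerabilities.foldl (fun st vuln =>
      let severity := PySem.Dict.getD (PySem.Dict.mk vuln) "severity" "UNKNOWN"
      let priority := PySem.Dict.getD SEVERITY_ORDER severity 999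
      if priority < st.2 then (severity, priority) else st)
      (worst_severity, worst_priority)).1

-- ===== PORT B =====
def get_worst_severity_alt (vulnerabilities : List (List (String × String))) : String :=
  let present : PySem.Set String :=
    PySem.Set.ofList (vulnerabilities.map (fun v => PySem.Dict.getD (PySem.Dict.mk v) "severity" "UNKNOWN"))
  match (PySem.Dict.keys SEVERITY_ORDER).find? (fun level => PySem.Set.contains present level) with
  | some level => level
  | none => "NONE"

-- ===== PRECONDITION & SPEC =====
def Spec_get_worst_severity (vulnerabilities : List (List (String × String))) (out : String) : Prop := out = get_worst_severity_alt vulnerabilities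
instance (vulnerabilities : List (List (String × String))) (out : String) : Decidable (Spec_get_worst_severity vulnerabilities out) := by unfold Spec_get_worst_severity; infer_instance

-- ===== CLAIM (what is proved, stated in full; the proofs are below) =====
def Claim_equal_get_worst_severity : Prop := ∀ (vulnerabilities : List (List (String × String))), Dom_get_worst_severity vulnerabilities → Spec_get_worst_severity vulnerabilities (get_worst_severity vulnerabilities)

-- ===== LEMMAS AND PROOFS =====

def pvPrio (s : String) : Int := PySem.Dict.getD SEVERITY_ORDER s 999

def pvName (p : Int) : String :=
  if p = 0 then "CRITICAL" else if p = 1 then "HIGH" else if p = 2 then "MEDIUM"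
  else if p = 3 then "LOW" else if p = 4 then "UNKNOWN" else if p = 5 then "WARNING" else "NONE"

def pvStep (st : String × Int) (s : String) : String × Int :=
  if pvPrio s < st.2 then (s, pvPrio s) else st

def pvChain (p : Int) (S : List String) : String :=
  if 0 < p ∧ "CRITICAL" ∈ S then "CRITICAL"
  else if 1 < p ∧ "HIGH" ∈ S then "HIGH"
  else if 2 < p ∧ "MEDIUM" ∈ S then "MEDIUM"
  else if 3 < p ∧ "LOW" ∈ S then "LOW"
  else if 4 < p ∧ "UNKNOWN" ∈ S then "UNKNOWN"
  else if 5 < p ∧ "WARNING" ∈ S then "WARNING"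
  else pvName p

lemma pvPrio_cases (s : String) :
    pvPrio s = 999 ∨ (s = pvName (pvPrio s) ∧ 0 ≤ pvPrio s ∧ pvPrio s ≤ 6) := by
  unfold pvPrio SEVERITY_ORDER
  rw [PySem.Dict.getD_eq_get?_getD]
  simp only [PySem.Dict.get?_mk_cons, beq_iff_eq]
  split_ifs with h1 h2 h3 h4 h5 h6 h7 <;>
    first
      | (subst_vars; decide)
      | (left; rw [show (PySem.Dict.mk ([] : List (String × Int))).get? s = none from rfl]; rfl)

lemma pvChain_cons_lt (S : List String) (p q : Int) (s : String)
    (hq : q < p) (hp : p ≤ 6) (h0 : 0 ≤ q) (hs : s = pvName q) :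
    pvChain p (s :: S) = pvChain q S := by
  subst hs
  have h5 : q ≤ 5 := by omega
  interval_cases q <;>
    simp_all [pvChain, pvName, List.mem_cons] <;>
    split_ifs <;> simp_all <;> omega

set_option maxRecDepth 4096 in
set_option maxHeartbeats 2000000 in
lemma pvChain_cons_ge (S : List String) (p : Int) (s : String)
    (hge : p ≤ pvPrio s) (hp0 : 0 ≤ p) (hp6 : p ≤ 6) :
    pvChain p (s :: S) = pvChain p S := by
  rcases pvPrio_cases s with h999 | ⟨hs, hq0, hq6⟩
  · have hC : s ≠ "CRITICAL" := fun h => by subst h; revert h999; decide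
    have hH : s ≠ "HIGH" := fun h => by subst h; revert h999; decide
    have hM : s ≠ "MEDIUM" := fun h => by subst h; revert h999; decide
    have hL : s ≠ "LOW" := fun h => by subst h; revert h999; decide
    have hU : s ≠ "UNKNOWN" := fun h => by subst h; revert h999; decide
    have hW : s ≠ "WARNING" := fun h => by subst h; revert h999; decide
    have iC : ("CRITICAL" = s ∨ "CRITICAL" ∈ S) ↔ "CRITICAL" ∈ S :=
      or_iff_right (fun h => hC h.symm)
    have iH : ("HIGH" = s ∨ "HIGH" ∈ S) ↔ "HIGH" ∈ S := or_iff_right (fun h => hH h.symm)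
    have iM : ("MEDIUM" = s ∨ "MEDIUM" ∈ S) ↔ "MEDIUM" ∈ S := or_iff_right (fun h => hM h.symm)
    have iL : ("LOW" = s ∨ "LOW" ∈ S) ↔ "LOW" ∈ S := or_iff_right (fun h => hL h.symm)
    have iU : ("UNKNOWN" = s ∨ "UNKNOWN" ∈ S) ↔ "UNKNOWN" ∈ S :=
      or_iff_right (fun h => hU h.symm)
    have iW : ("WARNING" = s ∨ "WARNING" ∈ S) ↔ "WARNING" ∈ S :=
      or_iff_right (fun h => hW h.symm)
    simp only [pvChain, List.mem_cons, iC, iH, iM, iL, iU, iW]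
  · generalize hgen : pvPrio s = q at hge hq0 hq6 hs
    subst hs
    clear hgen
    interval_cases q <;>
      norm_num [pvName] <;>
      simp only [pvChain, List.mem_cons] <;>
      split_ifs <;> first | rfl | (exfalso; omega) | simp_all

lemma pv_fold_chain (S : List String) : ∀ (p : Int) (w : String),
    w = pvName p → 0 ≤ p → p ≤ 6 →
    (S.foldl pvStep (w, p)).1 = pvChain p S := by
  induction S with
  | nil =>
    intro p w hw _ _
    simp [pvChain, hw]
  | cons s S ih =>
    intro p w hw hp0 hp6
    rw [List.foldl_cons]
    by_cases hq : pvPrio s < p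
    · have hcase := pvPrio_cases s
      rcases hcase with h999 | ⟨hs, hq0, hq6⟩
      · omega
      · rw [show pvStep (w, p) s = (s, pvPrio s) by simp [pvStep, hq]]
        rw [ih (pvPrio s) s hs hq0 hq6]
        exact (pvChain_cons_lt S p (pvPrio s) s hq hp6 hq0 hs).symm
    · rw [show pvStep (w, p) s = (w, p) by simp [pvStep, hq]]
      rw [ih p w hw hp0 hp6]
      exact (pvChain_cons_ge S p s (by omega) hp0 hp6).symm

lemma pvA_eq_chain (vulnerabilities : List (List (String × String))) :
    get_worst_severity vulnerabilities
      = pvChain 6 (vulnerabilities.map (fun v => PySem.Dict.getD (PySem.Dict.mk v) "severity" "UNKNOWN")) := by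
  unfold get_worst_severity
  by_cases h : vulnerabilities = []
  · subst h; simp [pvChain, pvName]
  · rw [if_neg h]
    have hf : (vulnerabilities.foldl (fun st vuln =>
        let severity := PySem.Dict.getD (PySem.Dict.mk vuln) "severity" "UNKNOWN"
        let priority := PySem.Dict.getD SEVERITY_ORDER severity 999
        if priority < st.2 then (severity, priority) else st)
        ("NONE", PySem.Dict.getD SEVERITY_ORDER "NONE" 999))
        = ((vulnerabilities.map (fun v => PySem.Dict.getD (PySem.Dict.mk v) "severity" "UNKNOWN")).foldl pvStep ("NONE", 6)) := by
      rw [List.foldl_map]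
      rfl
    show (vulnerabilities.foldl (fun st vuln =>
        let severity := PySem.Dict.getD (PySem.Dict.mk vuln) "severity" "UNKNOWN"
        let priority := PySem.Dict.getD SEVERITY_ORDER severity 999
        if priority < st.2 then (severity, priority) else st)
        ("NONE", PySem.Dict.getD SEVERITY_ORDER "NONE" 999)).1 = _
    rw [hf]
    exact pv_fold_chain _ 6 "NONE" (by decide) (by decide) (by decide)

lemma pvB_eq_chain (vulnerabilities : List (List (String × String))) :
    get_worst_severity_alt vulnerabilities
      = pvChain 6 (vulnerabilities.map (fun v => PySem.Dict.getD (PySem.Dict.mk v) "severity" "UNKNOWN")) := by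
  unfold get_worst_severity_alt
  set S := vulnerabilities.map (fun v => PySem.Dict.getD (PySem.Dict.mk v) "severity" "UNKNOWN") with hS
  clear_value S
  have hkeys : PySem.Dict.keys SEVERITY_ORDER
      = ["CRITICAL", "HIGH", "MEDIUM", "LOW", "UNKNOWN", "WARNING", "NONE"] := rfl
  rw [hkeys]
  have hc : ∀ x : String, PySem.Set.contains (PySem.Set.ofList S) x = decide (x ∈ S) := by
    intro x
    by_cases h : x ∈ S <;> simp [PySem.Set.mem_ofList, h]
  simp only [hc, List.find?]
  by_cases c1 : "CRITICAL" ∈ S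
  · simp [c1, pvChain]
  · by_cases c2 : "HIGH" ∈ S
    · simp [c1, c2, pvChain]
    · by_cases c3 : "MEDIUM" ∈ S
      · simp [c1, c2, c3, pvChain]
      · by_cases c4 : "LOW" ∈ S
        · simp [c1, c2, c3, c4, pvChain]
        · by_cases c5 : "UNKNOWN" ∈ S
          · simp [c1, c2, c3, c4, c5, pvChain]
          · by_cases c6 : "WARNING" ∈ S
            · simp [c1, c2, c3, c4, c5, c6, pvChain]
            · by_cases c7 : "NONE" ∈ S <;>
                simp [c1, c2, c3, c4, c5, c6, c7, pvChain, pvName]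

-- ===== VERDICT (by name: the statement is the Claim_ definition above) =====
theorem get_worst_severity_spec : Claim_equal_get_worst_severity := by
  intro vulnerabilities _
  unfold Spec_get_worst_severity
  rw [pvA_eq_chain, pvB_eq_chain]
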